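-- pv_equiv track=rewrite | github.com/k1rep/Flexeme4J | tangle_concerns/tangle_by_file.py | merge_commit_chains
-- ===== SOURCE A (Python) =====
-- from collections import defaultdict
-- from typing import List, Tuple, Any
--
-- def merge_commit_chains(list_of_pairs: List[Tuple[str, str]]) -> List[Tuple[str, ...]]:
--     """
--     Merge the commit chains to form a list of tuples where each tuple is a chain of commits.
--     """
--     before_to_after = defaultdict(list)
--     after_to_before = {}
--     for before, after in list_of_pairs:
--         before_to_after[before].append(after)
--         after_to_before[after] = before
--     merged_chains = list()
--     while before_to_after:
--         start = next((k for k in before_to_after.keys() if k not in after_to_before), None)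
--         if start is None:
--             start = next(iter(before_to_after))
--
--         chain = []
--         current = start
--
--         while current is not None:
--             chain.append(current)
--             next_commit = before_to_after.pop(current, None)
--             if next_commit:
--                 current = next_commit[0]
--             else:
--                 current = None
--         merged_chains.append(tuple(chain))
--     return merged_chains
-- ===== SOURCE B (Python) =====
-- def merge_commit_chains(list_of_pairs):
--     """
--     Merge the commit chains to form a list of tuples where each tuple is a chain of commits.
--     One pass precomputes each node's successor and the set of 'after' nodes; chains are then
--     built in two linear sweeps over the keys: heads (never an 'after') first, then cycle
--     remnants, following successor links with a 'done' set instead of popping from the dict.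
--     """
--     nxt = {}
--     afters = set()
--     for before, after in list_of_pairs:
--         nxt.setdefault(before, after)
--         afters.add(after)
--     chains = []
--     done = set()
--
--     def build(start):
--         chain = []
--         cur = start
--         while True:
--             chain.append(cur)
--             if cur in nxt and cur not in done:
--                 done.add(cur)
--                 cur = nxt[cur]
--             else:
--                 break
--         chains.append(tuple(chain))
--
--     for k in nxt:
--         if k not in afters:
--             build(k)
--     for k in nxt:
--         if k not in done:
--             build(k)
--     return chains
-- ===== Notes on version B (the rewrite author's own statement) =====
-- stated objective: faster
-- what changed: A rescans the whole remaining dict for a new chain head before every chain; B precomputes each node's successor and the set of 'after' nodes in one pass, then builds all chains in two linear sweeps over the keys (heads first, then cycle remnants), so no per-chain rescans remain.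
import Mathlib
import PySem

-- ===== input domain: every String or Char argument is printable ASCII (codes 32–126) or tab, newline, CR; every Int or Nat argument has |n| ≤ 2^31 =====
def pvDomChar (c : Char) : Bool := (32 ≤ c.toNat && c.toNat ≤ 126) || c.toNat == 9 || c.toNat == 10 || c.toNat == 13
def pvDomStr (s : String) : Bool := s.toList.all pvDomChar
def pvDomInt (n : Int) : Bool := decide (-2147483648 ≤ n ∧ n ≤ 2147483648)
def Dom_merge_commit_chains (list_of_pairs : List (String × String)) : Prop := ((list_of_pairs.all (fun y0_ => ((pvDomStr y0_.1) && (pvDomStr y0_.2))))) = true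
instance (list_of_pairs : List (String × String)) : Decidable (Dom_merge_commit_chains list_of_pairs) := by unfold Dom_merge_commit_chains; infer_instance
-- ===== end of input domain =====

-- B replaces A's per-chain rescans of the remaining dict by one precomputation of successors
-- and head nodes followed by two linear sweeps over the keys (objective: faster).


-- ===== PORT A =====
-- helper lemma for termination of the ports' while-loops
theorem pv_erase_size_lt {ν : Type} (d : PySem.Dict String ν) (k : String) (v : ν)
    (h : d.get? k = some v) : (d.erase k).size < d.size := by
  simp only [PySem.Dict.get?, Option.map_eq_some_iff] at h
  obtain ⟨p, hp, -⟩ := h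
  have hmem := List.mem_of_find?_eq_some hp
  have hpred := List.find?_some hp
  simp only [PySem.Dict.erase, PySem.Dict.size]
  exact List.length_filter_lt_length_iff_exists.mpr ⟨p, hmem, by simp [hpred]⟩

-- inner while loop of A: append current, pop its successor list, follow its first element
def pvA_chainLoop (btoa : PySem.Dict String (List String)) (current : String)
    (chain : List String) : List String × PySem.Dict String (List String) :=
  match h : btoa.pop? current with
  | some r =>
      if r.1.isEmpty then (chain ++ [current], r.2)
      else pvA_chainLoop r.2 (r.1.headD "") (chain ++ [current])
  | none => (chain ++ [current], btoa)
termination_by btoa.size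
decreasing_by
  simp only [PySem.Dict.pop?, Option.map_eq_some_iff] at h
  obtain ⟨v, hv, hr⟩ := h
  have := pv_erase_size_lt btoa current v hv
  rw [← hr]
  exact this

theorem pvA_chainLoop_size_le (btoa : PySem.Dict String (List String)) (current : String)
    (chain : List String) : (pvA_chainLoop btoa current chain).2.size ≤ btoa.size := by
  suffices h : ∀ (n : Nat) (btoa : PySem.Dict String (List String)) (current : String)
      (chain : List String), btoa.size ≤ n →
      (pvA_chainLoop btoa current chain).2.size ≤ btoa.size from
    h btoa.size btoa current chain le_rfl
  intro n
  induction n with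
  | zero =>
      intro btoa current chain hn
      rw [pvA_chainLoop.eq_def]
      split
      · rename_i r hpop
        exfalso
        have hitems : btoa.items = [] := by
          have := Nat.le_zero.mp hn
          simpa [PySem.Dict.size, List.length_eq_zero_iff] using this
        simp [PySem.Dict.pop?, PySem.Dict.get?, hitems] at hpop
      · simp
  | succ n ih =>
      intro btoa current chain hn
      rw [pvA_chainLoop.eq_def]
      split
      · rename_i r hpop
        simp only [PySem.Dict.pop?, Option.map_eq_some_iff] at hpop
        obtain ⟨v, hv, hr⟩ := hpop
        have hlt : r.2.size < btoa.size := by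
          rw [← hr]; exact pv_erase_size_lt btoa current v hv
        split
        · exact Nat.le_of_lt hlt
        · exact le_trans (ih r.2 _ _ (by omega)) (Nat.le_of_lt hlt)
      · simp

theorem pvA_chainLoop_size_lt (btoa : PySem.Dict String (List String)) (current : String)
    (chain : List String) (h : btoa.contains current = true) :
    (pvA_chainLoop btoa current chain).2.size < btoa.size := by
  have hsome : (btoa.get? current).isSome := by
    rw [PySem.Dict.contains_eq_isSome_get?] at h
    exact h
  obtain ⟨v, hv⟩ := Option.isSome_iff_exists.mp hsome
  have hlt := pv_erase_size_lt btoa current v hv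
  have hpop : btoa.pop? current = some (v, btoa.erase current) := by
    simp [PySem.Dict.pop?, hv]
  rw [pvA_chainLoop.eq_def]
  split
  · rename_i r hpop'
    rw [hpop] at hpop'
    obtain rfl : (v, btoa.erase current) = r := by injection hpop'
    split
    · exact hlt
    · exact Nat.lt_of_le_of_lt (pvA_chainLoop_size_le _ _ _) hlt
  · rename_i hpop'
    rw [hpop] at hpop'
    cases hpop'

theorem pv_start_mem (l : List String) (p : String → Bool) (h : l ≠ []) :
    (l.find? p).getD (l.headD "") ∈ l := by
  cases hf : l.find? p with
  | some s => simpa using List.mem_of_find?_eq_some hf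
  | none =>
      cases l with
      | nil => exact absurd rfl h
      | cons x xs => simp

-- outer while loop of A: pick the first remaining key that is never an 'after'
-- (else the first remaining key), build its chain, repeat
def pvA_outer (btoa : PySem.Dict String (List String)) (atob : PySem.Dict String String)
    (acc : List (List String)) : List (List String) :=
  if h : btoa.size = 0 then acc
  else
    let start := (btoa.keys.find? (fun k => !(atob.contains k))).getD (btoa.keys.headD "")
    pvA_outer (pvA_chainLoop btoa start []).2 atob (acc ++ [(pvA_chainLoop btoa start []).1])
termination_by btoa.size
decreasing_by
  apply pvA_chainLoop_size_lt
  apply (PySem.Dict.contains_iff_mem_keys _ _).mpr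
  apply pv_start_mem
  intro hnil
  apply h
  simpa [PySem.Dict.size, PySem.Dict.keys] using congrArg List.length hnil

def merge_commit_chains (list_of_pairs : List (String × String)) : List (List String) :=
  let init := list_of_pairs.foldl
    (fun (p : PySem.Dict String (List String) × PySem.Dict String String) ba =>
      (p.1.modify ba.1 [] (fun l => l ++ [ba.2]), p.2.insert ba.2 ba.1))
    (PySem.Dict.empty, PySem.Dict.empty)
  pvA_outer init.1 init.2 []

-- ===== PORT B =====
-- chain builder of B: follow successor links, marking nodes done instead of popping
def pvB_build (nxt : PySem.Dict String String) (done : PySem.Set String)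
    (cur : String) (chain : List String) : List String × PySem.Set String :=
  if nxt.contains cur && !(PySem.Set.contains done cur) then
    pvB_build nxt (PySem.Set.add done cur) (nxt.getD cur "") (chain ++ [cur])
  else (chain ++ [cur], done)
termination_by (nxt.keys.filter (fun k => !(done.contains k))).length
decreasing_by
  rename_i h
  simp only [Bool.and_eq_true, Bool.not_eq_true'] at h
  obtain ⟨hc, hd⟩ := h
  have hmem : cur ∈ nxt.keys := (PySem.Dict.contains_iff_mem_keys _ _).mp hc
  have hnd : cur ∉ done := by simpa using hd
  have hadd : PySem.Set.add done cur = done ++ [cur] := by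
    simp [PySem.Set.add, PySem.Set.contains, hnd]
  rw [hadd]
  have hsub : nxt.keys.filter (fun k => !((done ++ [cur]).contains k)) =
      (nxt.keys.filter (fun k => !(done.contains k))).filter (fun k => !(k == cur)) := by
    rw [List.filter_filter]
    apply List.filter_congr
    intro x _
    by_cases hx : x = cur <;> by_cases hxd : x ∈ done <;>
      simp [hx, hxd, List.contains_iff_mem]
  rw [hsub]
  apply List.length_filter_lt_length_iff_exists.mpr
  refine ⟨cur, ?_, by simp⟩
  simp only [List.mem_filter, Bool.not_eq_true']
  refine ⟨hmem, ?_⟩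
  simpa [List.contains_iff_mem] using hd

def merge_commit_chains_alt (list_of_pairs : List (String × String)) : List (List String) :=
  let init := list_of_pairs.foldl
    (fun (p : PySem.Dict String String × PySem.Set String) ba =>
      (p.1.setdefault ba.1 ba.2, PySem.Set.add p.2 ba.2))
    (PySem.Dict.empty, PySem.Set.empty)
  let st1 := init.1.keys.foldl
    (fun (s : List (List String) × PySem.Set String) k =>
      if !(PySem.Set.contains init.2 k) then
        (s.1 ++ [(pvB_build init.1 s.2 k []).1], (pvB_build init.1 s.2 k []).2)
      else s)
    ([], PySem.Set.empty)
  let st2 := init.1.keys.foldl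
    (fun (s : List (List String) × PySem.Set String) k =>
      if !(PySem.Set.contains s.2 k) then
        (s.1 ++ [(pvB_build init.1 s.2 k []).1], (pvB_build init.1 s.2 k []).2)
      else s)
    st1
  st2.1

-- ===== PRECONDITION & SPEC =====
def Spec_merge_commit_chains (list_of_pairs : List (String × String)) (out : List (List String)) : Prop := out = merge_commit_chains_alt list_of_pairs
instance (list_of_pairs : List (String × String)) (out : List (List String)) : Decidable (Spec_merge_commit_chains list_of_pairs out) := by unfold Spec_merge_commit_chains; infer_instance

-- ===== CLAIM (what is proved, stated in full; the proofs are below) =====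
def Claim_equal_merge_commit_chains : Prop := ∀ (list_of_pairs : List (String × String)), Dom_merge_commit_chains list_of_pairs → Spec_merge_commit_chains list_of_pairs (merge_commit_chains list_of_pairs)

-- ===== LEMMAS AND PROOFS =====

-- the list of 'after's recorded for a given 'before', in pair order
def pvAfterList (pairs : List (String × String)) (c : String) : List String :=
  (pairs.filter (fun p => p.1 == c)).map (fun p => p.2)

def pvBtoa (pairs : List (String × String)) : PySem.Dict String (List String) :=
  pairs.foldl (fun d p => d.modify p.1 [] (fun l => l ++ [p.2])) PySem.Dict.empty

def pvAtob (pairs : List (String × String)) : PySem.Dict String String :=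
  pairs.foldl (fun d p => d.insert p.2 p.1) PySem.Dict.empty

def pvNxt (pairs : List (String × String)) : PySem.Dict String String :=
  pairs.foldl (fun d p => d.setdefault p.1 p.2) PySem.Dict.empty

def pvAfters (pairs : List (String × String)) : PySem.Set String :=
  pairs.foldl (fun s p => PySem.Set.add s p.2) PySem.Set.empty

-- A's dict state after the keys in 'done' have been popped
def pvDd (pairs : List (String × String)) (done : List String) :
    PySem.Dict String (List String) :=
  PySem.Dict.mk ((pvBtoa pairs).items.filter (fun p => !(done.contains p.1)))

theorem pv_ports_split (pairs : List (String × String)) :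
    merge_commit_chains pairs = pvA_outer (pvBtoa pairs) (pvAtob pairs) [] := by
  have h := PySem.List.foldl_prod_mk
    (fun (d : PySem.Dict String (List String)) (ba : String × String) =>
      d.modify ba.1 [] (fun l => l ++ [ba.2]))
    (fun (d : PySem.Dict String String) (ba : String × String) => d.insert ba.2 ba.1)
    pairs PySem.Dict.empty PySem.Dict.empty
  simp only [merge_commit_chains]
  rw [show (List.foldl
      (fun (p : PySem.Dict String (List String) × PySem.Dict String String) ba =>
        (p.1.modify ba.1 [] fun l => l ++ [ba.2], p.2.insert ba.2 ba.1))
      (PySem.Dict.empty, PySem.Dict.empty) pairs) = (pvBtoa pairs, pvAtob pairs) from h]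


theorem pv_alt_split (pairs : List (String × String)) :
    merge_commit_chains_alt pairs =
      ((pvNxt pairs).keys.foldl
        (fun (s : List (List String) × PySem.Set String) k =>
          if !(PySem.Set.contains s.2 k) then
            (s.1 ++ [(pvB_build (pvNxt pairs) s.2 k []).1], (pvB_build (pvNxt pairs) s.2 k []).2)
          else s)
        ((pvNxt pairs).keys.foldl
          (fun (s : List (List String) × PySem.Set String) k =>
            if !(PySem.Set.contains (pvAfters pairs) k) then
              (s.1 ++ [(pvB_build (pvNxt pairs) s.2 k []).1], (pvB_build (pvNxt pairs) s.2 k []).2)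
            else s)
          ([], PySem.Set.empty))).1 := by
  have h := PySem.List.foldl_prod_mk
    (fun (d : PySem.Dict String String) (ba : String × String) => d.setdefault ba.1 ba.2)
    (fun (st : PySem.Set String) (ba : String × String) => PySem.Set.add st ba.2)
    pairs PySem.Dict.empty PySem.Set.empty
  simp only [merge_commit_chains_alt]
  rw [show (List.foldl
      (fun (p : PySem.Dict String String × PySem.Set String) ba =>
        (p.1.setdefault ba.1 ba.2, PySem.Set.add p.2 ba.2))
      (PySem.Dict.empty, PySem.Set.empty) pairs) = (pvNxt pairs, pvAfters pairs) from h]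


theorem pvBtoa_keys (pairs : List (String × String)) :
    (pvBtoa pairs).keys = PySem.Set.ofList (pairs.map (fun p => p.1)) := by
  have h := PySem.Dict.keys_foldl_modify_key pairs (fun p => p.1) []
    (fun _ x l => l ++ [x.2]) PySem.Dict.empty
  simpa [pvBtoa, PySem.Set.ofList_eq_foldl, PySem.Set.update, PySem.Dict.keys_empty] using h


theorem pvNxt_aux_get (pairs : List (String × String)) :
    ∀ (d : PySem.Dict String String) (c : String),
      (pairs.foldl (fun d p => d.setdefault p.1 p.2) d).get? c =
        (d.get? c).or (pvAfterList pairs c).head? := by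
  induction pairs with
  | nil => intro d c; simp [pvAfterList]
  | cons p ps ih =>
      intro d c
      simp only [List.foldl_cons]
      rw [ih]
      have hAL : pvAfterList (p :: ps) c =
          if p.1 = c then p.2 :: pvAfterList ps c else pvAfterList ps c := by
        unfold pvAfterList
        by_cases hpc : p.1 = c <;> simp [List.filter_cons, hpc]
      rw [hAL]
      by_cases hpc : p.1 = c
      · rw [if_pos hpc]
        cases hcont : d.contains p.1 with
        | false =>
            rw [PySem.Dict.setdefault_of_not_contains _ _ hcont]
            have hdc : d.get? c = none := by
              rw [PySem.Dict.get?_eq_none_iff_contains, ← hpc]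
              exact hcont
            rw [hdc, PySem.Dict.get?_insert]
            simp [hpc]
        | true =>
            rw [PySem.Dict.setdefault_of_contains _ _ hcont]
            have hsome : (d.get? c).isSome := by
              rw [← hpc, ← PySem.Dict.contains_eq_isSome_get?]
              exact hcont
            obtain ⟨v, hv⟩ := Option.isSome_iff_exists.mp hsome
            rw [hv]
            simp [Option.some_or]
      · rw [if_neg hpc]
        cases hcont : d.contains p.1 with
        | false =>
            rw [PySem.Dict.setdefault_of_not_contains _ _ hcont, PySem.Dict.get?_insert]
            have hne : ¬ c = p.1 := fun h => hpc h.symm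
            simp [hne]
        | true => rw [PySem.Dict.setdefault_of_contains _ _ hcont]

theorem pvNxt_aux_keys (pairs : List (String × String)) :
    ∀ (d : PySem.Dict String String),
      (pairs.foldl (fun d p => d.setdefault p.1 p.2) d).keys =
        PySem.Set.update d.keys (pairs.map (fun p => p.1)) := by
  induction pairs with
  | nil => intro d; simp [PySem.Set.update]
  | cons p ps ih =>
      intro d
      simp only [List.foldl_cons, List.map_cons]
      rw [ih]
      have hupd : PySem.Set.update d.keys (p.1 :: ps.map (fun p => p.1)) =
          PySem.Set.update (PySem.Set.add d.keys p.1) (ps.map (fun p => p.1)) := by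
        simp [PySem.Set.update]
      rw [hupd]
      congr 1
      cases hcont : d.contains p.1 with
      | true =>
          rw [PySem.Dict.setdefault_of_contains _ _ hcont]
          have hm : p.1 ∈ d.keys := (PySem.Dict.contains_iff_mem_keys _ _).mp hcont
          simp [PySem.Set.add, PySem.Set.contains, List.contains_iff_mem, hm]
      | false =>
          rw [PySem.Dict.setdefault_of_not_contains _ _ hcont,
            PySem.Dict.keys_insert_of_not_contains _ _ hcont]
          have hm : p.1 ∉ d.keys := fun hm => by
            rw [(PySem.Dict.contains_iff_mem_keys _ _).mpr hm] at hcont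
            cases hcont
          simp [PySem.Set.add, PySem.Set.contains, List.contains_iff_mem, hm]

theorem pvBtoa_getD (pairs : List (String × String)) (c : String) :
    (pvBtoa pairs).getD c [] = pvAfterList pairs c := by
  have h := PySem.Dict.getD_foldl_modify_append pairs PySem.Dict.empty c
  simpa [pvBtoa, pvAfterList, PySem.Dict.getD_empty] using h

theorem pvNxt_keys (pairs : List (String × String)) :
    (pvNxt pairs).keys = PySem.Set.ofList (pairs.map (fun p => p.1)) := by
  have h := pvNxt_aux_keys pairs PySem.Dict.empty
  simpa [pvNxt, PySem.Set.ofList_eq_foldl, PySem.Set.update, PySem.Dict.keys_empty] using h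


theorem pvNxt_get? (pairs : List (String × String)) (c : String) :
    (pvNxt pairs).get? c = (pvAfterList pairs c).head? := by
  have h := pvNxt_aux_get pairs PySem.Dict.empty c
  simpa [pvNxt, PySem.Dict.get?_empty] using h


theorem pv_afterList_ne_nil (pairs : List (String × String)) (c : String) :
    pvAfterList pairs c ≠ [] ↔ c ∈ pairs.map (fun p => p.1) := by
  unfold pvAfterList
  rw [Ne, List.map_eq_nil_iff, List.filter_eq_nil_iff]
  constructor
  · intro h
    by_contra hmem
    exact h (fun a ha hpa => hmem (by
      simp only [List.mem_map]
      exact ⟨a, ha, by simpa using hpa⟩))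
  · rintro hmem hall
    obtain ⟨a, ha, rfl⟩ := List.mem_map.mp hmem
    exact hall a ha (by simp)


theorem pvBtoa_get? (pairs : List (String × String)) (c : String) :
    (pvBtoa pairs).get? c =
      if pvAfterList pairs c = [] then none else some (pvAfterList pairs c) := by
  cases hq : (pvBtoa pairs).get? c with
  | none =>
      have hcont : (pvBtoa pairs).contains c = false :=
        (PySem.Dict.get?_eq_none_iff_contains _ _).mp hq
      have hnotmem : c ∉ pairs.map (fun p => p.1) := by
        intro hm
        have hmk : c ∈ (pvBtoa pairs).keys := by
          rw [pvBtoa_keys]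
          exact (PySem.Set.mem_ofList _ _).mpr hm
        rw [(PySem.Dict.contains_iff_mem_keys _ _).mpr hmk] at hcont
        cases hcont
      have hnil : pvAfterList pairs c = [] := by
        by_contra hne
        exact hnotmem ((pv_afterList_ne_nil pairs c).mp hne)
      simp [hnil]
  | some l =>
      have hcont : (pvBtoa pairs).contains c = true := by
        rw [PySem.Dict.contains_eq_isSome_get?, hq]
        rfl
      have hmem : c ∈ pairs.map (fun p => p.1) := by
        have hmk := (PySem.Dict.contains_iff_mem_keys _ _).mp hcont
        rw [pvBtoa_keys] at hmk
        exact (PySem.Set.mem_ofList _ _).mp hmk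
      have hne : pvAfterList pairs c ≠ [] := (pv_afterList_ne_nil pairs c).mpr hmem
      have hl : l = pvAfterList pairs c := by
        have hg := pvBtoa_getD pairs c
        rw [PySem.Dict.getD_eq_get?_getD, hq] at hg
        simpa using hg
      rw [hl]
      simp [hne]


theorem pvAfters_eq (pairs : List (String × String)) :
    pvAfters pairs = PySem.Set.ofList (pairs.map (fun p => p.2)) := by
  simp [pvAfters, PySem.Set.ofList_eq_foldl, List.foldl_map]


theorem pvAtob_contains (pairs : List (String × String)) (k : String) :
    (pvAtob pairs).contains k = PySem.Set.contains (pvAfters pairs) k := by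
  have hkeys : (pvAtob pairs).keys = PySem.Set.ofList (pairs.map (fun p => p.2)) := by
    have h := PySem.Dict.keys_foldl_insert_key pairs (fun p => p.2)
      (fun _ x => x.1) PySem.Dict.empty
    simpa [pvAtob, PySem.Set.ofList_eq_foldl, PySem.Set.update, PySem.Dict.keys_empty] using h
  rw [PySem.Dict.contains_eq_decide_mem_keys, hkeys, pvAfters_eq]
  by_cases hm : k ∈ PySem.Set.ofList (pairs.map (fun p => p.2)) <;>
    simp [hm, PySem.Set.contains, List.contains_iff_mem]


theorem pvNxt_contains_iff (pairs : List (String × String)) (c : String) :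
    (pvNxt pairs).contains c = true ↔ pvAfterList pairs c ≠ [] := by
  rw [PySem.Dict.contains_iff_mem_keys, pvNxt_keys, PySem.Set.mem_ofList]
  exact (pv_afterList_ne_nil pairs c).symm


theorem pv_value_mem_afters (pairs : List (String × String)) (c : String)
    (h : (pvNxt pairs).contains c = true) :
    PySem.Set.contains (pvAfters pairs) ((pvNxt pairs).getD c "") = true := by
  have hne : pvAfterList pairs c ≠ [] := (pvNxt_contains_iff pairs c).mp h
  obtain ⟨a, rest, hAL⟩ := List.exists_cons_of_ne_nil hne
  have hget : (pvNxt pairs).get? c = some a := by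
    rw [pvNxt_get?, hAL]
    rfl
  have hgetD : (pvNxt pairs).getD c "" = a := by
    rw [PySem.Dict.getD_eq_get?_getD, hget]
    rfl
  rw [hgetD, pvAfters_eq]
  have hmem : a ∈ pairs.map (fun p => p.2) := by
    have hma : a ∈ pvAfterList pairs c := by
      rw [hAL]
      exact List.mem_cons_self ..
    unfold pvAfterList at hma
    obtain ⟨p, hp, rfl⟩ := List.mem_map.mp hma
    exact List.mem_map.mpr ⟨p, List.mem_of_mem_filter hp, rfl⟩
  simp [PySem.Set.contains, List.contains_iff_mem, (PySem.Set.mem_ofList _ _).mpr hmem]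


theorem pvDd_nil (pairs : List (String × String)) : pvDd pairs [] = pvBtoa pairs := by
  apply PySem.Dict.ext
  simp [pvDd]


theorem pvDd_get? (pairs : List (String × String)) (done : List String) (c : String) :
    (pvDd pairs done).get? c =
      if done.contains c then none else (pvBtoa pairs).get? c := by
  unfold pvDd
  simp only [PySem.Dict.get?, List.find?_filter]
  by_cases hdc : done.contains c = true
  · simp only [hdc, if_true]
    have hnone : (List.find? (fun a => decide ((!done.contains a.1) = true ∧ (a.1 == c) = true))
        (pvBtoa pairs).items) = none := by
      rw [List.find?_eq_none]
      intro p _ hpred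
      simp only [decide_eq_true_eq, Bool.not_eq_true'] at hpred
      obtain ⟨h1, h2⟩ := hpred
      have hpc : p.1 = c := by simpa using h2
      rw [hpc] at h1
      rw [h1] at hdc
      cases hdc
    rw [hnone]
    rfl
  · have hdc' : done.contains c = false := by simpa using hdc
    simp only [hdc', Bool.false_eq_true, if_false]
    have hfun : (fun a : String × List String =>
        decide ((!done.contains a.1) = true ∧ (a.1 == c) = true)) = (fun p => p.1 == c) := by
      funext a
      by_cases ha : a.1 = c
      · have hcm : c ∉ done := by simpa using hdc
        simp [ha, hcm]
      · simp [ha]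
    rw [hfun]

theorem pvDd_keys (pairs : List (String × String)) (done : List String) :
    (pvDd pairs done).keys = (pvBtoa pairs).keys.filter (fun k => !(done.contains k)) := by
  unfold pvDd
  simp only [PySem.Dict.keys]
  rw [show (fun k => !(done.contains k)) = ((fun k => !(done.contains k)) : String → Bool) from rfl]
  exact (List.filter_map (f := fun p : String × List String => p.1)
    (p := fun k => !(done.contains k))).symm


theorem pvDd_erase (pairs : List (String × String)) (done : List String) (c : String)
    (h : c ∉ done) : (pvDd pairs done).erase c = pvDd pairs (done ++ [c]) := by
  apply PySem.Dict.ext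
  unfold pvDd
  simp only [PySem.Dict.erase, List.filter_filter]
  apply List.filter_congr
  intro x _
  by_cases hx : x.1 = c <;> by_cases hxd : x.1 ∈ done <;>
    simp [hx, hxd, h]


theorem pv_chain_sim (pairs : List (String × String)) (done : List String)
    (cur : String) (chain : List String) :
    pvA_chainLoop (pvDd pairs done) cur chain =
      ((pvB_build (pvNxt pairs) done cur chain).1,
        pvDd pairs (pvB_build (pvNxt pairs) done cur chain).2) := by
  fun_induction pvB_build (pvNxt pairs) done cur chain with
  | case1 done cur chain hcond ih =>
      simp only [Bool.and_eq_true, Bool.not_eq_true'] at hcond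
      obtain ⟨hc, hd⟩ := hcond
      have hnd : cur ∉ done := by simpa using hd
      have hne : pvAfterList pairs cur ≠ [] := (pvNxt_contains_iff pairs cur).mp hc
      obtain ⟨a, rest, hAL⟩ := List.exists_cons_of_ne_nil hne
      have hbget : (pvBtoa pairs).get? cur = some (a :: rest) := by
        rw [pvBtoa_get?, if_neg hne, hAL]
      have hget : (pvDd pairs done).get? cur = some (a :: rest) := by
        rw [pvDd_get?, if_neg (by simp [List.contains_iff_mem, hnd]), hbget]
      have hpop : (pvDd pairs done).pop? cur =
          some (a :: rest, (pvDd pairs done).erase cur) := by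
        simp [PySem.Dict.pop?, hget]
      have hgetD : (pvNxt pairs).getD cur "" = a := by
        rw [PySem.Dict.getD_eq_get?_getD, pvNxt_get?, hAL]
        rfl
      have hadd : PySem.Set.add done cur = done ++ [cur] := by
        simp [PySem.Set.add, PySem.Set.contains, hnd]
      rw [pvA_chainLoop.eq_def]
      split
      · rename_i r hpop'
        rw [hpop] at hpop'
        obtain rfl : (a :: rest, (pvDd pairs done).erase cur) = r := by injection hpop'
        rw [if_neg (by simp)]
        rw [pvDd_erase pairs done cur hnd]
        have : (a :: rest).headD "" = a := rfl
        rw [this, ← hadd, ← hgetD]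
        exact ih
      · rename_i hpop'
        rw [hpop] at hpop'
        cases hpop'
  | case2 done cur chain hcond =>
      have hnone : (pvDd pairs done).pop? cur = none := by
        suffices hg : (pvDd pairs done).get? cur = none by simp [PySem.Dict.pop?, hg]
        rw [pvDd_get?]
        by_cases hdc : cur ∈ done
        · rw [if_pos (by simpa [List.contains_iff_mem] using hdc)]
        · rw [if_neg (by simpa [List.contains_iff_mem] using hdc)]
          have hdset : PySem.Set.contains done cur = false := by
            simpa [PySem.Set.contains, List.contains_iff_mem] using hdc
          have hcfalse : (pvNxt pairs).contains cur = false := by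
            cases hcc : (pvNxt pairs).contains cur with
            | false => rfl
            | true => exact absurd (by simp [hcc]; exact hdc) hcond
          have hnil : pvAfterList pairs cur = [] := by
            by_contra hne
            rw [(pvNxt_contains_iff pairs cur).mpr hne] at hcfalse
            cases hcfalse
          rw [pvBtoa_get?, if_pos hnil]
      rw [pvA_chainLoop.eq_def]
      split
      · rename_i r hpop'
        rw [hnone] at hpop'
        cases hpop'
      · rfl

theorem pvB_build_done_subset (nxt : PySem.Dict String String) (done : PySem.Set String)
    (cur : String) (chain : List String) :
    ∀ x ∈ done, x ∈ (pvB_build nxt done cur chain).2 := by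
  fun_induction pvB_build nxt done cur chain with
  | case1 done cur chain hcond ih =>
      intro x hx
      apply ih
      unfold PySem.Set.add
      split
      · exact hx
      · exact List.mem_append_left _ hx
  | case2 done cur chain hcond =>
      intro x hx
      exact hx

theorem pvB_build_done_mem (nxt : PySem.Dict String String) (P : String → Prop)
    (hP : ∀ c, nxt.contains c = true → P (nxt.getD c ""))
    (done : PySem.Set String) (cur : String) (chain : List String) :
    ∀ x ∈ (pvB_build nxt done cur chain).2, x ∈ done ∨ x = cur ∨ P x := by
  fun_induction pvB_build nxt done cur chain with
  | case1 done cur chain hcond ih =>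
      intro x hx
      simp only [Bool.and_eq_true, Bool.not_eq_true'] at hcond
      rcases ih x hx with hmem | heq | hpx
      · -- x ∈ Set.add done cur
        unfold PySem.Set.add at hmem
        split at hmem
        · exact Or.inl hmem
        · rcases List.mem_append.mp hmem with h1 | h1
          · exact Or.inl h1
          · exact Or.inr (Or.inl (by simpa using h1))
      · exact Or.inr (Or.inr (heq ▸ hP cur hcond.1))
      · exact Or.inr (Or.inr hpx)
  | case2 done cur chain hcond =>
      intro x hx
      exact Or.inl hx

theorem pvB_build_start_mem (nxt : PySem.Dict String String) (done : PySem.Set String)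
    (cur : String) (chain : List String) (h1 : nxt.contains cur = true)
    (h2 : PySem.Set.contains done cur = false) :
    cur ∈ (pvB_build nxt done cur chain).2 := by
  have hnd : cur ∉ done := by simpa [PySem.Set.contains] using h2
  rw [pvB_build.eq_def]
  rw [if_pos (by simp [h1, hnd])]
  apply pvB_build_done_subset
  unfold PySem.Set.add
  split
  · rename_i hcc
    exact absurd (by simpa [PySem.Set.contains] using hcc) hnd
  · exact List.mem_append_right _ (List.mem_cons_self ..)

-- phase-2 scheduling: once no head remains outside 'done', A's outer loop visits the
-- remaining keys in insertion order, exactly as B's second sweep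
theorem pv_ph2 (pairs : List (String × String)) (ks pre done : List String)
    (acc : List (List String))
    (hsplit : (pvNxt pairs).keys = pre ++ ks)
    (hpre : ∀ k ∈ pre, k ∈ done)
    (hnohead : ∀ k ∈ (pvNxt pairs).keys, k ∉ done → PySem.Set.contains (pvAfters pairs) k = true) :
    pvA_outer (pvDd pairs done) (pvAtob pairs) acc =
      (ks.foldl
        (fun (s : List (List String) × PySem.Set String) k =>
          if !(PySem.Set.contains s.2 k) then
            (s.1 ++ [(pvB_build (pvNxt pairs) s.2 k []).1], (pvB_build (pvNxt pairs) s.2 k []).2)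
          else s)
        (acc, done)).1 := by
  induction ks generalizing pre done acc with
  | nil =>
      simp only [List.foldl_nil]
      have hpreeq : (pvNxt pairs).keys = pre := by simpa using hsplit
      have hkeysnil : (pvDd pairs done).keys = [] := by
        rw [pvDd_keys, List.filter_eq_nil_iff]
        intro k hk
        have hk' : k ∈ (pvNxt pairs).keys := by
          rw [pvNxt_keys]
          rw [pvBtoa_keys] at hk
          exact hk
        have hkd : k ∈ done := hpre k (by rw [← hpreeq]; exact hk')
        simp [List.contains_iff_mem, hkd]
      have hitems : (pvDd pairs done).items = [] := by
        have hk := hkeysnil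
        simp only [PySem.Dict.keys] at hk
        exact List.map_eq_nil_iff.mp hk
      rw [pvA_outer.eq_def, dif_pos (by simp [PySem.Dict.size, hitems])]
  | cons k ks' ih =>
      have hkeys : (pvNxt pairs).keys = pre ++ k :: ks' := hsplit
      by_cases hdk : k ∈ done
      · have hsc : PySem.Set.contains done k = true := by
          simp [PySem.Set.contains, List.contains_iff_mem, hdk]
        simp only [List.foldl_cons]
        rw [if_neg (by simp; exact hdk)]
        exact ih (pre ++ [k]) done acc (by simpa using hkeys)
          (fun x hx => by
            rcases List.mem_append.mp hx with h1 | h1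
            · exact hpre x h1
            · have hxk : x = k := by simpa using h1
              rw [hxk]
              exact hdk)
          hnohead
      · have hkmem : k ∈ (pvNxt pairs).keys := by
          rw [hkeys]
          exact List.mem_append_right _ (List.mem_cons_self ..)
        have hcont : (pvNxt pairs).contains k = true :=
          (PySem.Dict.contains_iff_mem_keys _ _).mpr hkmem
        have hsc : PySem.Set.contains done k = false := by
          simp [PySem.Set.contains, List.contains_iff_mem, hdk]
        have hbkeys : (pvBtoa pairs).keys = pre ++ k :: ks' := by
          rw [pvBtoa_keys, ← pvNxt_keys]
          exact hkeys
        have hpref : pre.filter (fun x => !(done.contains x)) = [] := by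
          rw [List.filter_eq_nil_iff]
          intro x hx
          simp [List.contains_iff_mem, hpre x hx]
        have hDdkeys : (pvDd pairs done).keys =
            k :: ks'.filter (fun x => !(done.contains x)) := by
          rw [pvDd_keys, hbkeys, List.filter_append, hpref, List.nil_append, List.filter_cons,
            if_pos (by simp [List.contains_iff_mem, hdk])]
        have hsz : (pvDd pairs done).size ≠ 0 := by
          intro h0
          have hitems : (pvDd pairs done).items = [] := by
            simpa [PySem.Dict.size, List.length_eq_zero_iff] using h0
          rw [PySem.Dict.keys, hitems] at hDdkeys
          simp at hDdkeys
        have hfind : List.find? (fun x => !((pvAtob pairs).contains x))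
            (pvDd pairs done).keys = none := by
          rw [List.find?_eq_none]
          intro x hx
          rw [pvDd_keys] at hx
          have hx1 := (List.mem_filter.mp hx).1
          have hx2 : x ∉ done := by
            simpa [List.contains_iff_mem] using (List.mem_filter.mp hx).2
          have hxk : x ∈ (pvNxt pairs).keys := by
            rw [pvNxt_keys, ← pvBtoa_keys]
            exact hx1
          rw [pvAtob_contains, hnohead x hxk hx2]
          simp
        have hstart : ((pvDd pairs done).keys.find?
              (fun x => !((pvAtob pairs).contains x))).getD ((pvDd pairs done).keys.headD "") = k := by
          rw [hfind, Option.getD_none, hDdkeys, List.headD_cons]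
        rw [pvA_outer.eq_def, dif_neg hsz]
        simp only [hstart]
        rw [pv_chain_sim]
        simp only [List.foldl_cons]
        rw [if_pos (by simp; exact hdk)]
        exact ih (pre ++ [k]) (pvB_build (pvNxt pairs) done k []).2
          (acc ++ [(pvB_build (pvNxt pairs) done k []).1])
          (by simpa using hkeys)
          (fun x hx => by
            rcases List.mem_append.mp hx with h1 | h1
            · exact pvB_build_done_subset _ _ _ _ x (hpre x h1)
            · have hxk : x = k := by simpa using h1
              rw [hxk]
              exact pvB_build_start_mem _ _ _ _ hcont hsc)
          (fun x hxk hxd =>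
            hnohead x hxk (fun hmem => hxd (pvB_build_done_subset _ _ _ _ x hmem)))

-- phase-1 scheduling: while unprocessed heads remain, A's outer loop picks exactly the
-- next head in insertion order, as B's first sweep does
theorem pv_ph1 (pairs : List (String × String)) (ks pre done : List String)
    (acc : List (List String))
    (hsplit : (pvNxt pairs).keys = pre ++ ks)
    (hheads : ∀ k ∈ (pvNxt pairs).keys,
      PySem.Set.contains (pvAfters pairs) k = false → k ∉ done → k ∈ ks)
    (hksfresh : ∀ k ∈ ks, PySem.Set.contains (pvAfters pairs) k = false → k ∉ done) :
    pvA_outer (pvDd pairs done) (pvAtob pairs) acc =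
      ((pvNxt pairs).keys.foldl
        (fun (s : List (List String) × PySem.Set String) k =>
          if !(PySem.Set.contains s.2 k) then
            (s.1 ++ [(pvB_build (pvNxt pairs) s.2 k []).1], (pvB_build (pvNxt pairs) s.2 k []).2)
          else s)
        (ks.foldl
          (fun (s : List (List String) × PySem.Set String) k =>
            if !(PySem.Set.contains (pvAfters pairs) k) then
              (s.1 ++ [(pvB_build (pvNxt pairs) s.2 k []).1], (pvB_build (pvNxt pairs) s.2 k []).2)
            else s)
          (acc, done))).1 := by
  induction ks generalizing pre done acc with
  | nil =>
      simp only [List.foldl_nil]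
      exact pv_ph2 pairs (pvNxt pairs).keys [] done acc (by simp)
        (fun k hk => absurd hk List.not_mem_nil)
        (fun x hxk hxd => by
          cases haf : PySem.Set.contains (pvAfters pairs) x with
          | true => rfl
          | false => exact absurd (hheads x hxk haf hxd) List.not_mem_nil)
  | cons k ks' ih =>
      have hkeys : (pvNxt pairs).keys = pre ++ k :: ks' := hsplit
      have hnd : (pvNxt pairs).keys.Nodup := by
        rw [pvNxt_keys]
        exact PySem.Set.nodup_ofList _
      have hndsplit : (pre ++ k :: ks').Nodup := hkeys ▸ hnd
      by_cases hhk : PySem.Set.contains (pvAfters pairs) k = true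
      · have hmemaf : k ∈ pvAfters pairs := by
          simpa [PySem.Set.contains, List.contains_iff_mem] using hhk
        simp only [List.foldl_cons]
        rw [if_neg (by simp; exact hmemaf)]
        exact ih (pre ++ [k]) done acc (by simpa using hkeys)
          (fun x hxk hxaf hxd => by
            have hxin := hheads x hxk hxaf hxd
            rcases List.mem_cons.mp hxin with rfl | hin
            · rw [hxaf] at hhk
              cases hhk
            · exact hin)
          (fun x hx hxaf => hksfresh x (List.mem_cons_of_mem _ hx) hxaf)
      · have hhk' : PySem.Set.contains (pvAfters pairs) k = false := by simpa using hhk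
        have hkd : k ∉ done := hksfresh k (List.mem_cons_self ..) hhk'
        have hkmem : k ∈ (pvNxt pairs).keys := by
          rw [hkeys]
          exact List.mem_append_right _ (List.mem_cons_self ..)
        have hcont : (pvNxt pairs).contains k = true :=
          (PySem.Dict.contains_iff_mem_keys _ _).mpr hkmem
        have hsc : PySem.Set.contains done k = false := by
          simp [PySem.Set.contains, List.contains_iff_mem, hkd]
        have hbkeys : (pvBtoa pairs).keys = pre ++ k :: ks' := by
          rw [pvBtoa_keys, ← pvNxt_keys]
          exact hkeys
        have hknotks' : k ∉ ks' := by
          have h2 := (List.nodup_append.mp hndsplit).2.1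
          exact (List.nodup_cons.mp h2).1
        have hDdkeys : (pvDd pairs done).keys =
            pre.filter (fun x => !(done.contains x)) ++
              k :: ks'.filter (fun x => !(done.contains x)) := by
          rw [pvDd_keys, hbkeys, List.filter_append, List.filter_cons,
            if_pos (by simp [List.contains_iff_mem, hkd])]
        have hfind : List.find? (fun x => !((pvAtob pairs).contains x))
            (pvDd pairs done).keys = some k := by
          rw [hDdkeys, List.find?_append]
          have hpre_none : List.find? (fun x => !((pvAtob pairs).contains x))
              (pre.filter (fun x => !(done.contains x))) = none := by
            rw [List.find?_eq_none]
            intro x hx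
            have hx1 : x ∈ pre := List.mem_of_mem_filter hx
            have hx2 : x ∉ done := by
              simpa [List.contains_iff_mem] using (List.mem_filter.mp hx).2
            have hxk : x ∈ (pvNxt pairs).keys := by
              rw [hkeys]
              exact List.mem_append_left _ hx1
            cases haf : PySem.Set.contains (pvAfters pairs) x with
            | true =>
                rw [pvAtob_contains, haf]
                simp
            | false =>
                have hxin := hheads x hxk haf hx2
                exact absurd hxin
                  (fun hin => (List.nodup_append.mp hndsplit).2.2 x hx1 x hin rfl)
          rw [hpre_none, Option.none_or]
          rw [List.find?_cons_of_pos (by rw [pvAtob_contains, hhk']; simp)]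
        have hsz : (pvDd pairs done).size ≠ 0 := by
          intro h0
          have hitems : (pvDd pairs done).items = [] := by
            simpa [PySem.Dict.size, List.length_eq_zero_iff] using h0
          rw [PySem.Dict.keys, hitems] at hDdkeys
          simp at hDdkeys
        have hnmemaf : k ∉ pvAfters pairs := by
          simpa [PySem.Set.contains, List.contains_iff_mem] using hhk'
        have hstart : ((pvDd pairs done).keys.find?
              (fun x => !((pvAtob pairs).contains x))).getD ((pvDd pairs done).keys.headD "") = k := by
          rw [hfind, Option.getD_some]
        rw [pvA_outer.eq_def, dif_neg hsz]
        simp only [hstart]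
        rw [pv_chain_sim]
        simp only [List.foldl_cons]
        rw [if_pos (by simp; exact hnmemaf)]
        exact ih (pre ++ [k]) (pvB_build (pvNxt pairs) done k []).2
          (acc ++ [(pvB_build (pvNxt pairs) done k []).1])
          (by simpa using hkeys)
          (fun x hxk hxaf hxd2 => by
            have hxd : x ∉ done := fun hm => hxd2 (pvB_build_done_subset _ _ _ _ x hm)
            have hxin := hheads x hxk hxaf hxd
            rcases List.mem_cons.mp hxin with rfl | hin
            · exact absurd (pvB_build_start_mem _ _ _ _ hcont hsc) hxd2
            · exact hin)
          (fun x hx hxaf hmem => by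
            rcases pvB_build_done_mem (pvNxt pairs)
                (fun y => PySem.Set.contains (pvAfters pairs) y = true)
                (fun c hc => pv_value_mem_afters pairs c hc) done k [] x hmem with
              hmem1 | hxk | hP
            · exact hksfresh x (List.mem_cons_of_mem _ hx) hxaf hmem1
            · exact hknotks' (hxk ▸ hx)
            · rw [hxaf] at hP
              cases hP)

-- ===== VERDICT (by name: the statement is the Claim_ definition above) =====
theorem merge_commit_chains_spec : Claim_equal_merge_commit_chains := by
  intro pairs _
  unfold Spec_merge_commit_chains
  rw [pv_ports_split, pv_alt_split, ← pvDd_nil]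
  exact pv_ph1 pairs (pvNxt pairs).keys [] [] [] (by simp)
    (fun k hk _ _ => hk) (fun _ _ _ => List.not_mem_nil)
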